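-- pv_equiv track=rewrite | github.com/kaashmonee/cp | dp/possible_prime_partitions.py | solve
-- ===== SOURCE A (Python) =====
-- mod=1000000007
--
-- def solve(s):
--
--     # dp approach
--     # define dp memoization table
--     # dp[i] = the number of ways that you can split up
--     # s[:i] into prime partitions
--
--     def is_prime(ns):
--         n = int(ns)
--         if n % 2 == 0: return False
--
--         d = 3
--         while d**2 <= n:
--             if n % d == 0:
--                 return False
--             d += 2
--
--         return True
--
--     dp = dict()
--     dp[0] = 1
--
--     def solve_rec(ns, i):
--         # ns is the number but is a string
--         # i is the index
--
--         if i in dp: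
--             return dp[i]
--
--         cnt = 0
--
--         for j in range(1, 7):
--             # number shouldn't have leading zero and
--             # it should be prime
--             if (i - j >= 0 and is_prime(ns[i-j:i]) and ns[i-j] != "0"):
--                 cnt += solve_rec(ns, i - j)
--                 cnt %= mod
--
--         dp[i] = cnt
--         return dp[i]
--
--     return solve_rec(s, len(s))
-- ===== SOURCE B (Python) =====
-- mod = 1000000007
--
-- def solve(s):
--     # bottom-up dp: dp[i] = number of prime partitions of s[:i]
--     def is_prime(ns):
--         n = int(ns)
--         if n % 2 == 0: return False
--         d = 3
--         while d**2 <= n: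
--             if n % d == 0:
--                 return False
--             d += 2
--         return True
--
--     n = len(s)
--     dp = [1] + [0] * n
--     for i in range(1, n + 1):
--         acc = 0
--         for j in range(1, 7):
--             if j <= i and s[i - j] != "0" and is_prime(s[i - j:i]):
--                 acc = (acc + dp[i - j]) % mod
--         dp[i] = acc
--     return dp[n]
-- ===== Notes on version B (the rewrite author's own statement) =====
-- stated objective: simpler
-- what changed: Replaced A's memoized top-down recursion (solve_rec with a dict memo) by a bottom-up dp array filled left to right with the same recurrence; the is_prime helper is kept identical so its quirks (1 counted prime, 2 not) are reproduced.
-- outside the precondition, e.g. on solve('a000000'): A returns 0, B raises ValueError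
import Mathlib
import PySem

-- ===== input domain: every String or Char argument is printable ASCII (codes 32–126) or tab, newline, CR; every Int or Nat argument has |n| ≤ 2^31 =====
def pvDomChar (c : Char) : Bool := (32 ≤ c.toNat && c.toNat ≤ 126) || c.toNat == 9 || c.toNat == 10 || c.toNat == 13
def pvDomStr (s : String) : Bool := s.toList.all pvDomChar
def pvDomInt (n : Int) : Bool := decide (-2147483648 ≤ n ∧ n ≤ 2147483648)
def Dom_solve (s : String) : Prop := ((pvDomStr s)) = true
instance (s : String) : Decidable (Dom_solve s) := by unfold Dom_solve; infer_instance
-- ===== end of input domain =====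

-- B replaces A's memoized top-down recursion by a bottom-up dp array filled left to right (same recurrence, simpler iterative decomposition).


-- ===== PORT A =====
-- shared helper: the is_prime of both Pythons (textually identical there).
-- fuel bounds the while loop; it is ≥ the number of iterations, so the loop is exact.
def pyIsPrimeLoop (n : Int) : Int → Nat → Bool
  | _, 0 => true
  | d, f+1 =>
    if d ^ 2 ≤ n then
      (if PySem.Int.mod n d = 0 then false else pyIsPrimeLoop n (d + 2) f)
    else true

-- int(ns) raising ValueError is `none`; Python raises there, the port returns false (outside Pre_).
def pyIsPrime (ns : List Char) : Bool :=
  match PySem.Int.ofChars? ns with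
  | none => false
  | some n => if PySem.Int.mod n 2 = 0 then false else pyIsPrimeLoop n 3 (n.toNat + 1)

-- the condition of A's `if`, in A's order: i-j>=0, is_prime(ns[i-j:i]), ns[i-j] != "0"
def condA (cs : List Char) (i j : Nat) : Bool :=
  decide (j ≤ i) &&
    pyIsPrime (PySem.List.slice cs (some ((i : Int) - (j : Int))) (some (i : Int))) &&
    (PySem.List.pyGet? cs ((i : Int) - (j : Int)) != some '0')

-- solve_rec with its memo dict threaded through; fuel > i always holds at every call.
def solveRecA (cs : List Char) : Nat → Nat → PySem.Dict Int Int → Int × PySem.Dict Int Int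
  | 0, _, dp => (0, dp)
  | f + 1, i, dp =>
    match dp.get? (i : Int) with
    | some v => (v, dp)
    | none =>
      let r := [1, 2, 3, 4, 5, 6].foldl
        (fun (st : Int × PySem.Dict Int Int) j =>
          if condA cs i j then
            let p := solveRecA cs f (i - j) st.2
            (PySem.Int.mod (st.1 + p.1) 1000000007, p.2)
          else st) (0, dp)
      (r.1, r.2.insert (i : Int) r.1)

def solve (s : String) : Int :=
  (solveRecA s.toList (s.toList.length + 1) s.toList.length
    ((PySem.Dict.empty).insert 0 1)).1

-- ===== PORT B =====
-- the condition of B's `if`, in B's order: j <= i, s[i-j] != "0", is_prime(s[i-j:i])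
def condB (cs : List Char) (i j : Nat) : Bool :=
  decide (j ≤ i) &&
    (PySem.List.pyGet? cs ((i : Int) - (j : Int)) != some '0') &&
    pyIsPrime (PySem.List.slice cs (some ((i : Int) - (j : Int))) (some (i : Int)))

def stepB (cs : List Char) (dp : List Int) (i : Nat) : Int :=
  [1, 2, 3, 4, 5, 6].foldl
    (fun acc j => if condB cs i j then PySem.Int.mod (acc + dp.getD (i - j) 0) 1000000007 else acc) 0

def buildB (cs : List Char) : Nat → List Int
  | 0 => [1]
  | i + 1 => let dp := buildB cs i; dp ++ [stepB cs dp (i + 1)]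

def solve_alt (s : String) : Int :=
  (buildB s.toList s.toList.length).getD s.toList.length 0

-- ===== PRECONDITION & SPEC =====
-- Pre_ excludes strings containing a non-digit character: there A almost always raises
-- ValueError in int(); on rare such strings A's lazy top-down search still returns while
-- bottom-up B, which evaluates every substring, raises.
def Pre_solve (s : String) : Prop := s.toList.all Char.isDigit = true
instance (s : String) : Decidable (Pre_solve s) := by unfold Pre_solve; infer_instance
def pvWitness_solve : String := "235"

def Spec_solve (s : String) (out : Int) : Prop := out = solve_alt s
instance (s : String) (out : Int) : Decidable (Spec_solve s out) := by unfold Spec_solve; infer_instance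

-- ===== CLAIM (what is proved, stated in full; the proofs are below) =====
def Claim_equal_solve : Prop := ∀ (s : String), Dom_solve s → Pre_solve s → Spec_solve s (solve s)

-- ===== LEMMAS AND PROOFS =====

-- the canonical dp value: Fdp cs i = dp[i] of B
def Fdp (cs : List Char) (i : Nat) : Int := (buildB cs i).getD i 0

lemma length_buildB (cs : List Char) (i : Nat) : (buildB cs i).length = i + 1 := by
  induction i with
  | zero => rfl
  | succ n ih => simp [buildB, ih]

lemma getD_buildB (cs : List Char) {k i : Nat} (h : k ≤ i) :
    (buildB cs i).getD k 0 = Fdp cs k := by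
  induction i with
  | zero => interval_cases k; rfl
  | succ n ih =>
    rcases Nat.lt_or_ge k (n + 1) with hk | hk
    · have hbuild : buildB cs (n + 1) = buildB cs n ++ [stepB cs (buildB cs n) (n + 1)] := rfl
      have hlen : k < (buildB cs n).length := by rw [length_buildB]; omega
      rw [hbuild, List.getD_append _ _ _ _ hlen]
      exact ih (by omega)
    · have : k = n + 1 := by omega
      subst this; rfl

lemma Fdp_succ (cs : List Char) (i : Nat) :
    Fdp cs (i + 1) = stepB cs (buildB cs i) (i + 1) := by
  have hbuild : buildB cs (i + 1) = buildB cs i ++ [stepB cs (buildB cs i) (i + 1)] := rfl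
  have hlen : (buildB cs i).length = i + 1 := length_buildB cs i
  unfold Fdp
  rw [hbuild, List.getD, List.getElem?_append_right (by omega), hlen]
  simp

lemma condA_eq_condB (cs : List Char) (i j : Nat) : condA cs i j = condB cs i j := by
  unfold condA condB
  cases decide (j ≤ i) <;>
    cases PySem.List.pyGet? cs ((i : Int) - (j : Int)) != some '0' <;>
    cases pyIsPrime (PySem.List.slice cs (some ((i : Int) - (j : Int))) (some (i : Int))) <;> rfl

-- invariant on A's memo dict
def MemoInv (cs : List Char) (dp : PySem.Dict Int Int) : Prop :=
  dp.get? 0 = some 1 ∧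
    ∀ (key : Int) (v : Int), dp.get? key = some v → ∃ k : Nat, key = (k : Int) ∧ v = Fdp cs k

lemma MemoInv_insert (cs : List Char) {dp : PySem.Dict Int Int} (h : MemoInv cs dp)
    (k : Nat) (hk : k ≠ 0) :
    MemoInv cs (dp.insert (k : Int) (Fdp cs k)) := by
  constructor
  · rw [PySem.Dict.get?_insert_of_ne _ _
      (by exact_mod_cast fun h0 => hk (by exact_mod_cast h0.symm) : (0 : Int) ≠ (k : Int))]
    exact h.1
  · intro key v hget
    by_cases hkey : key = (k : Int)
    · subst hkey
      rw [PySem.Dict.get?_insert_self] at hget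
      exact ⟨k, rfl, (Option.some_inj.mp hget).symm⟩
    · rw [PySem.Dict.get?_insert_of_ne _ _ hkey] at hget
      exact h.2 key v hget

-- main lemma: with enough fuel and a well-formed memo, solveRecA returns Fdp and preserves the invariant
lemma solveRecA_correct (cs : List Char) :
    ∀ (fuel i : Nat) (dp : PySem.Dict Int Int), i < fuel → MemoInv cs dp →
      (solveRecA cs fuel i dp).1 = Fdp cs i ∧ MemoInv cs (solveRecA cs fuel i dp).2 := by
  intro fuel
  induction fuel with
  | zero => intro i dp h; omega
  | succ f ih =>
    intro i dp hfuel hinv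
    rw [solveRecA]
    cases hmem : dp.get? (i : Int) with
    | some v =>
      obtain ⟨k, hk, hv⟩ := hinv.2 _ _ hmem
      have : k = i := by exact_mod_cast hk.symm
      subst this
      exact ⟨hv, hinv⟩
    | none =>
      -- i ≠ 0 since dp.get? 0 = some 1 and the lookup failed
      have hi0 : i ≠ 0 := by
        intro h0; subst h0
        simp only [Nat.cast_zero, hinv.1] at hmem
        cases hmem
      -- the fold computes the pure fold of the same conditions over Fdp, threading an invariant dict
      have hfold : ∀ (js : List Nat), (∀ j ∈ js, 1 ≤ j) →
          ∀ (acc : Int) (d : PySem.Dict Int Int), MemoInv cs d →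
            (js.foldl (fun (st : Int × PySem.Dict Int Int) j =>
              if condA cs i j then
                let p := solveRecA cs f (i - j) st.2
                (PySem.Int.mod (st.1 + p.1) 1000000007, p.2)
              else st) (acc, d)).1 =
              js.foldl (fun acc j => if condA cs i j then
                PySem.Int.mod (acc + Fdp cs (i - j)) 1000000007 else acc) acc ∧
            MemoInv cs ((js.foldl (fun (st : Int × PySem.Dict Int Int) j =>
              if condA cs i j then
                let p := solveRecA cs f (i - j) st.2
                (PySem.Int.mod (st.1 + p.1) 1000000007, p.2)
              else st) (acc, d)).2) := by
        intro js
        induction js with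
        | nil => intro _ acc d hd; exact ⟨rfl, hd⟩
        | cons j js ihjs =>
          intro hpos acc d hd
          simp only [List.foldl_cons]
          by_cases hc : condA cs i j = true
          · simp only [hc, if_true]
            have hj1 : 1 ≤ j := hpos j (List.mem_cons_self ..)
            have hji : j ≤ i := by
              have hcc := hc
              unfold condA at hcc
              simp only [Bool.and_eq_true, decide_eq_true_eq] at hcc
              exact hcc.1.1
            obtain ⟨hv, hd'⟩ := ih (i - j) d (by omega) hd
            have hrest := ihjs (fun x hx => hpos x (List.mem_cons_of_mem _ hx))
              (PySem.Int.mod (acc + Fdp cs (i - j)) 1000000007)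
              (solveRecA cs f (i - j) d).2 hd'
            rw [hv]
            simpa using hrest
          · simp only [hc]
            exact ihjs (fun x hx => hpos x (List.mem_cons_of_mem _ hx)) acc d hd
      obtain ⟨h1, h2⟩ := hfold [1, 2, 3, 4, 5, 6] (by decide) 0 dp hinv
      -- the pure fold equals stepB on buildB cs (i-1), i.e. Fdp cs i
      obtain ⟨i', rfl⟩ : ∃ i', i = i' + 1 := ⟨i - 1, by omega⟩
      have hpure : ([1, 2, 3, 4, 5, 6].foldl (fun acc j => if condA cs (i' + 1) j then
            PySem.Int.mod (acc + Fdp cs (i' + 1 - j)) 1000000007 else acc) 0 : Int) =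
          Fdp cs (i' + 1) := by
        rw [Fdp_succ]
        unfold stepB
        apply List.foldl_ext
        intro acc j hj
        rw [condA_eq_condB]
        by_cases hc : condB cs (i' + 1) j = true
        · have hj1 : 1 ≤ j := by fin_cases hj <;> decide
          have hji : j ≤ i' + 1 := by
            have hcc := hc
            unfold condB at hcc
            simp only [Bool.and_eq_true, decide_eq_true_eq] at hcc
            exact hcc.1.1
          rw [hc, getD_buildB cs (by omega : i' + 1 - j ≤ i')]
        · simp [hc]
      refine ⟨by simpa using h1.trans hpure, ?_⟩
      simp only
      rw [h1.trans hpure]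
      exact MemoInv_insert cs h2 (i' + 1) (by omega)

lemma MemoInv_init (cs : List Char) : MemoInv cs ((PySem.Dict.empty).insert 0 1) := by
  constructor
  · exact PySem.Dict.get?_insert_self _ _ _
  · intro key v hget
    by_cases hk : key = 0
    · subst hk
      rw [PySem.Dict.get?_insert_self] at hget
      exact ⟨0, rfl, (Option.some_inj.mp hget).symm⟩
    · rw [PySem.Dict.get?_insert_of_ne _ _ hk] at hget
      simp [PySem.Dict.empty, PySem.Dict.get?] at hget

-- ===== VERDICT (by name: the statement is the Claim_ definition above) =====
theorem solve_spec : Claim_equal_solve := by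
  intro s _ _
  unfold Spec_solve solve solve_alt
  rw [(solveRecA_correct s.toList (s.toList.length + 1) s.toList.length
    ((PySem.Dict.empty).insert 0 1) (by omega) (MemoInv_init s.toList)).1]
  rfl
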